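-- pv_equiv track=rewrite | github.com/gougax22/backtrackingsudoku | sudoku.py | criar_diagonais
-- ===== SOURCE A (Python) =====
-- def criar_diagonais(tabuleiro, pares):#funcao para preenche as diagonais principais de cada subquadrante 3x3 com palíndromos formados pelos pares x,y
--     usados = set()   #armazena elementos unicos sem repeticao
--     for bloco_i in range(3):
--         for bloco_j in range(3):  #percorrer o subquadrante
--             for par in pares:   #para cada par em pares passado como parametro
--                 if par not in usados:  # verifica se o par nao nao esta em usados
--                     i, j = bloco_i * 3, bloco_j * 3  # calcula os índices iniciais do bloco no tabuleiro.
--                     tabuleiro[i][j], tabuleiro[i + 1][j + 1], tabuleiro[i + 2][j + 2] = par[0], par[1], par[0]  #preenche a diagonal com x,y,x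
--                     usados.add(par)   #Marca o par como usado.
--                     break    #sai do loop pro proximo bloco
--             else:  # se nenhuma par adequado foi encontrado
--                 return False   # retorna false indicando falha ao preencher as diagonais
--     return True   # se todas as diagonais foram preenchidas sem falhas retorna true
-- ===== SOURCE B (Python) =====
-- def criar_diagonais(tabuleiro, pares):
--     # one dedup pass (first occurrences, in order), then direct indexing per block;
--     # mutates tabuleiro exactly like the original (same cells, same order, same partial prefix)
--     unicos = []
--     vistos = set()
--     for par in pares:
--         if par not in vistos:
--             vistos.add(par)
--             unicos.append(par)
--     origens = [(bi * 3, bj * 3) for bi in range(3) for bj in range(3)]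
--     for k, (i, j) in enumerate(origens):
--         if k >= len(unicos):
--             return False
--         x, y = unicos[k]
--         tabuleiro[i][j], tabuleiro[i + 1][j + 1], tabuleiro[i + 2][j + 2] = x, y, x
--     return True
-- ===== Notes on version B (the rewrite author's own statement) =====
-- stated objective: alternative
-- what changed: A rescans the whole pares list for each of the 9 blocks to find the first unused pair; B deduplicates pares once (first occurrences, in order) and then fills each block by directly indexing the k-th unique pair.
import Mathlib
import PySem

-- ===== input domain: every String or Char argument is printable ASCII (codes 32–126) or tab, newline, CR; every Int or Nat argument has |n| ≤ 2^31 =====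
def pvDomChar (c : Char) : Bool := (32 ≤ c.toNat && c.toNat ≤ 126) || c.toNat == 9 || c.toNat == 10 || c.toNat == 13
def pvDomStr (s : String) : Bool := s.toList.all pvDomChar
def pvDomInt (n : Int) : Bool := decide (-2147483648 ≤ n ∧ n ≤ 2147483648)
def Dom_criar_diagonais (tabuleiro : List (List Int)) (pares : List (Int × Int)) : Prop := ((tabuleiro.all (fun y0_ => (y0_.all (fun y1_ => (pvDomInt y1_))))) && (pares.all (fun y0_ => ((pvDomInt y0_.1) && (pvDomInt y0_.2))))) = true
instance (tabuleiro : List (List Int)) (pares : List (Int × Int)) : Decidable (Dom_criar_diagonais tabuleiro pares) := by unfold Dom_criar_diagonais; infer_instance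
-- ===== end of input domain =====

-- B replaces A's per-block linear scan over `pares` with one dedup pass plus direct
-- indexing of the k-th unique pair (objective: alternative decomposition, one pass over pares).
-- Both Pythons mutate `tabuleiro` identically; the equivalence proved here is about
-- the RETURN value only (the Lean ports carry no board state, which never affects it).


-- ===== PORT A =====
-- inner `for par in pares: … break / else: return False`: first par not in usados,
-- returning the updated set (none = the for-else fired).  The board writes are pure
-- mutation of `tabuleiro` and never influence the returned Bool; under Pre_ they are
-- in range, so they are not carried in the port.
def pvA_inner (usados : PySem.Set (Int × Int)) : List (Int × Int) → Option (PySem.Set (Int × Int))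
  | [] => none
  | par :: rest =>
      if usados.contains par then pvA_inner usados rest
      else some (usados.add par)

-- the two nested `for bloco_i/bloco_j in range(3)` loops, threading `usados`
def pvA_blocks (pares : List (Int × Int)) (usados : PySem.Set (Int × Int)) :
    List (Nat × Nat) → Bool
  | [] => true
  | _ :: rest =>
      match pvA_inner usados pares with
      | none => false
      | some usados' => pvA_blocks pares usados' rest

def criar_diagonais (_tabuleiro : List (List Int)) (pares : List (Int × Int)) : Bool :=
  pvA_blocks pares PySem.Set.empty
    ((List.range 3).flatMap (fun bi => (List.range 3).map (fun bj => (bi, bj))))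

-- ===== PORT B =====
-- Source B's dedup loop: `if par not in vistos: vistos.add(par); unicos.append(par)`
-- appends exactly when new, i.e. a fold of PySem.Set.add.
def pvB_uniq (pares : List (Int × Int)) : List (Int × Int) :=
  pares.foldl PySem.Set.add []

-- `for k,(i,j) in enumerate(origens): if k >= len(unicos): return False; …`
def pvB_loop (unicos : List (Int × Int)) (k : Nat) : List (Nat × Nat) → Bool
  | [] => true
  | _ :: rest =>
      if k ≥ unicos.length then false
      else pvB_loop unicos (k + 1) rest

def criar_diagonais_alt (_tabuleiro : List (List Int)) (pares : List (Int × Int)) : Bool :=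
  pvB_loop (pvB_uniq pares) 0
    ((List.range 3).flatMap (fun bi => (List.range 3).map (fun bj => (bi * 3, bj * 3))))

-- ===== PRECONDITION & SPEC =====
-- Pre_ holds exactly when the Python A returns normally: A (and B) raise IndexError
-- iff some diagonal write of one of the min(9, #distinct pairs) filled blocks falls
-- outside the board; for a full 9×9 board Pre_ always holds.
def Pre_criar_diagonais (tabuleiro : List (List Int)) (pares : List (Int × Int)) : Prop :=
  ∀ t ∈ List.range (min 9 (PySem.List.dedup pares).length), ∀ r ∈ List.range 3,
    (t / 3) * 3 + r < tabuleiro.length ∧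
    (t % 3) * 3 + r < (tabuleiro.getD ((t / 3) * 3 + r) []).length
instance (tabuleiro : List (List Int)) (pares : List (Int × Int)) : Decidable (Pre_criar_diagonais tabuleiro pares) := by unfold Pre_criar_diagonais; infer_instance

def pvWitness_criar_diagonais : List (List Int) × (List (Int × Int)) :=
  (List.replicate 9 (List.replicate 9 0), [(1, 2), (3, 4)])

def Spec_criar_diagonais (tabuleiro : List (List Int)) (pares : List (Int × Int)) (out : Bool) : Prop := out = criar_diagonais_alt tabuleiro pares
instance (tabuleiro : List (List Int)) (pares : List (Int × Int)) (out : Bool) : Decidable (Spec_criar_diagonais tabuleiro pares out) := by unfold Spec_criar_diagonais; infer_instance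

-- ===== CLAIM (what is proved, stated in full; the proofs are below) =====
def Claim_equal_criar_diagonais : Prop := ∀ (tabuleiro : List (List Int)) (pares : List (Int × Int)), Dom_criar_diagonais tabuleiro pares → Pre_criar_diagonais tabuleiro pares → Spec_criar_diagonais tabuleiro pares (criar_diagonais tabuleiro pares)

-- ===== LEMMAS AND PROOFS =====
-- number of distinct elements of l not contained in S
def pvNew (S : PySem.Set (Int × Int)) : List (Int × Int) → Nat
  | [] => 0
  | p :: rest => if S.contains p then pvNew S rest else pvNew (S.add p) rest + 1

theorem pvA_inner_subset (l : List (Int × Int)) (S S' : PySem.Set (Int × Int))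
    (hs : pvA_inner S l = some S') : ∀ x ∈ S, x ∈ S' := by
  induction l generalizing S with
  | nil => simp [pvA_inner] at hs
  | cons p rest ih =>
    by_cases h : p ∈ S
    · simp only [pvA_inner, PySem.Set.contains, List.contains_iff_mem, h,
        if_true] at hs
      exact ih S hs
    · simp [pvA_inner, PySem.Set.contains, h] at hs
      subst hs
      intro x hx
      simp [hx]

theorem pvA_inner_count (l : List (Int × Int)) (S : PySem.Set (Int × Int)) :
    (pvA_inner S l = none → pvNew S l = 0) ∧
    (∀ S', pvA_inner S l = some S' → pvNew S l = pvNew S' l + 1) := by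
  induction l generalizing S with
  | nil => simp [pvA_inner, pvNew]
  | cons p rest ih =>
    by_cases h : p ∈ S
    · constructor
      · intro hn
        simp only [pvA_inner, PySem.Set.contains, List.contains_iff_mem, h,
          if_true] at hn
        simpa [pvNew, PySem.Set.contains, h] using (ih S).1 hn
      · intro S' hS'
        simp only [pvA_inner, PySem.Set.contains, List.contains_iff_mem, h,
          if_true] at hS'
        have hp' : p ∈ S' := pvA_inner_subset rest S S' hS' p h
        simpa [pvNew, PySem.Set.contains, h, hp'] using (ih S).2 S' hS'
    · constructor
      · intro hn
        simp [pvA_inner, PySem.Set.contains, h] at hn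
      · intro S' hS'
        simp [pvA_inner, PySem.Set.contains, h] at hS'
        subst hS'
        simp [pvNew, PySem.Set.contains, h]

theorem pvA_blocks_count (blocks : List (Nat × Nat)) (pares : List (Int × Int))
    (S : PySem.Set (Int × Int)) :
    pvA_blocks pares S blocks = decide (blocks.length ≤ pvNew S pares) := by
  induction blocks generalizing S with
  | nil => simp [pvA_blocks]
  | cons b rest ih =>
    rcases hinner : pvA_inner S pares with _ | S'
    · have h0 := (pvA_inner_count pares S).1 hinner
      simp [pvA_blocks, hinner, h0]
    · have h1 := (pvA_inner_count pares S).2 S' hinner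
      have : pvA_blocks pares S (b :: rest) = pvA_blocks pares S' rest := by
        simp [pvA_blocks, hinner]
      rw [this, ih S']
      simp only [List.length_cons, h1]
      by_cases h : rest.length ≤ pvNew S' pares <;> simp [h]

theorem pvB_uniq_len (l : List (Int × Int)) (S : PySem.Set (Int × Int)) :
    (l.foldl PySem.Set.add S).length = S.length + pvNew S l := by
  induction l generalizing S with
  | nil => simp [pvNew]
  | cons p rest ih =>
    by_cases h : p ∈ S
    · have hadd : S.add p = S := by simp [PySem.Set.add, PySem.Set.contains, h]
      rw [List.foldl_cons, hadd, ih S, pvNew]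
      simp [PySem.Set.contains, h]
    · have hadd : S.add p = S ++ [p] := by simp [PySem.Set.add, PySem.Set.contains, h]
      rw [List.foldl_cons, hadd, ih]
      rw [pvNew]
      simp [PySem.Set.contains, h]
      omega

theorem pvB_loop_count (blocks : List (Nat × Nat)) (u : List (Int × Int)) (k : Nat)
    (hk : k ≤ u.length) :
    pvB_loop u k blocks = decide (k + blocks.length ≤ u.length) := by
  induction blocks generalizing k with
  | nil => simp [pvB_loop, hk]
  | cons b rest ih =>
    by_cases h : k ≥ u.length
    · have hke : k = u.length := le_antisymm hk h
      simp [pvB_loop, hke]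
    · rw [pvB_loop]
      simp only [h, if_false]
      rw [ih (k + 1) (by omega)]
      by_cases h2 : k + 1 + rest.length ≤ u.length <;> simp [h2] <;> omega

-- ===== VERDICT (by name: the statement is the Claim_ definition above) =====
theorem criar_diagonais_spec : Claim_equal_criar_diagonais := by
  intro tabuleiro pares _ _
  unfold Spec_criar_diagonais criar_diagonais criar_diagonais_alt
  rw [pvA_blocks_count, pvB_loop_count]
  · have hu : (pvB_uniq pares).length = pvNew PySem.Set.empty pares := by
      simpa [PySem.Set.empty] using pvB_uniq_len pares []
    simp [hu]
  · simp
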